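-- pv_equiv track=rewrite | github.com/mylax/project_euler | 4/python/funcs.py | find_palindromic
-- ===== SOURCE A (Python) =====
-- def is_palindromic(n):
--     return n == int(str(n)[::-1])
--
-- def find_palindromic(n1, n2):
--     '''
--     finds highest product of two numbers that is palindromic in range of 1 to n1
--     and 1 to n2
--    '''
--     result = 0
--     for i in range(n1+1):
--        for j in range(n2+1):
--            prod = i*j
--            if is_palindromic(prod) and prod > result:
--                result = i * j
--                first_n = i
--                second_n = j
--     return {"prod":result, "n1":first_n, "n2":second_n}
-- ===== SOURCE B (Python) =====
-- def is_palindromic(n):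
--     return n == int(str(n)[::-1])
--
-- def find_palindromic(n1, n2):
--     '''
--     finds highest product of two numbers that is palindromic in range of 1 to n1
--     and 1 to n2
--     '''
--     for p in range(n1 * n2, 0, -1):
--         if not is_palindromic(p):
--             continue
--         for i in range(1, n1 + 1):
--             if p % i == 0 and p // i <= n2:
--                 return {"prod": p, "n1": i, "n2": p // i}
--     raise ValueError("no palindromic product of positive factors in range")
-- ===== Notes on version B (the rewrite author's own statement) =====
-- stated objective: faster
-- what changed: A scans every (i, j) pair keeping a running maximum; B enumerates candidate product values from n1*n2 downwards and returns at the first palindromic value that factors as i*j with i in 1..n1 (smallest such i) and j in 1..n2, so it stops as soon as the answer is found.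
import Mathlib
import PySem

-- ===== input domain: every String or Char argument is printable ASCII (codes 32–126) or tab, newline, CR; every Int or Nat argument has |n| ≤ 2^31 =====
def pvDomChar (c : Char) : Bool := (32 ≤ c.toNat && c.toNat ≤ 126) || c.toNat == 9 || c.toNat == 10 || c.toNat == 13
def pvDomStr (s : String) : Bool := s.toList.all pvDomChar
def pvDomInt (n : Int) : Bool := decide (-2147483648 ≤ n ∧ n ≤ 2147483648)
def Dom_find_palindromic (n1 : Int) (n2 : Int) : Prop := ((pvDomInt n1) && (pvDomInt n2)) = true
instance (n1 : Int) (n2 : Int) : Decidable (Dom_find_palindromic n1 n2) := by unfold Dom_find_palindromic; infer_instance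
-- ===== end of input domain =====

-- B replaces A's scan over all (i, j) pairs by a scan over candidate PRODUCT values from n1*n2
-- downwards, returning at the first palindromic value that factors as i*j with i in 1..n1 (smallest
-- such i) and j in 1..n2, stopping at the answer (objective: faster, measured).

-- ===== PORT A =====
-- is_palindromic: n == int(str(n)[::-1]).  For n < 0 Python's int() raises ValueError; both
-- programs only call this with n ≥ 0, so the `none => false` arm is never reached by the ports.
def pv_is_palindromic (n : Int) : Bool :=
  match PySem.Int.ofChars? ((PySem.Int.toChars n).reverse) with
  | some m => n == m
  | none => false

def find_palindromic (n1 : Int) (n2 : Int) : List (String × Int) :=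
  let st : Int × Option Int × Option Int :=
    (PySem.List.pyRange 0 (n1 + 1) 1).foldl (fun s i =>
      (PySem.List.pyRange 0 (n2 + 1) 1).foldl (fun s j =>
        if pv_is_palindromic (i * j) && decide (i * j > s.1) then (i * j, some i, some j) else s) s)
      (0, none, none)
  match st with
  | (r, some fn, some sn) => [("prod", r), ("n1", fn), ("n2", sn)]
  | (_, _, _) => []  -- Python raises UnboundLocalError here (first_n unassigned); excluded by Pre_

-- ===== PORT B =====
def find_palindromic_alt (n1 : Int) (n2 : Int) : List (String × Int) :=
  match (PySem.List.pyRange (n1 * n2) 0 (-1)).findSome? (fun p =>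
      if pv_is_palindromic p then
        ((PySem.List.pyRange 1 (n1 + 1) 1).find? (fun i =>
            PySem.Int.mod p i == 0 && decide (PySem.Int.floordiv p i ≤ n2))).map (fun i => (p, i))
      else none) with
  | some (p, i) => [("prod", p), ("n1", i), ("n2", PySem.Int.floordiv p i)]
  | none => []  -- Python raises ValueError here; excluded by Pre_

-- ===== PRECONDITION & SPEC =====
-- Pre_ excludes exactly the inputs where A raises UnboundLocalError (no positive palindromic
-- product exists, i.e. n1 < 1 or n2 < 1); B raises ValueError there.
def Pre_find_palindromic (n1 : Int) (n2 : Int) : Prop := 1 ≤ n1 ∧ 1 ≤ n2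
instance (n1 : Int) (n2 : Int) : Decidable (Pre_find_palindromic n1 n2) := by unfold Pre_find_palindromic; infer_instance
def pvWitness_find_palindromic : Int × Int := (3, 4)

def Spec_find_palindromic (n1 : Int) (n2 : Int) (out : List (String × Int)) : Prop := out = find_palindromic_alt n1 n2
instance (n1 : Int) (n2 : Int) (out : List (String × Int)) : Decidable (Spec_find_palindromic n1 n2 out) := by unfold Spec_find_palindromic; infer_instance

-- ===== CLAIM (what is proved, stated in full; the proofs are below) =====
def Claim_equal_find_palindromic : Prop := ∀ (n1 : Int) (n2 : Int), Dom_find_palindromic n1 n2 → Pre_find_palindromic n1 n2 → Spec_find_palindromic n1 n2 (find_palindromic n1 n2)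

-- ===== LEMMAS AND PROOFS =====

-- the "key" of a pair in A's scan: its product if palindromic, else 0 (0 never beats the start value)
def pvK (x : Int × Int) : Int := if pv_is_palindromic (x.1 * x.2) then x.1 * x.2 else 0

-- running maximum of pvK over a list of pairs
def pvMx (L : List (Int × Int)) (r : Int) : Int := L.foldl (fun m x => max m (pvK x)) r

def pvSel (o : Option (Int × Int)) (p : Option Int × Option Int) : Option Int × Option Int :=
  match o with | some x => (some x.1, some x.2) | none => p

-- A's loop body, as a function of the pair
def pvStep (s : Int × Option Int × Option Int) (x : Int × Int) : Int × Option Int × Option Int :=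
  if pv_is_palindromic (x.1 * x.2) && decide (x.1 * x.2 > s.1) then (x.1 * x.2, some x.1, some x.2) else s

theorem pvStep_eq (s : Int × Option Int × Option Int) (x : Int × Int) (h : 0 ≤ s.1) :
    pvStep s x = if s.1 < pvK x then (pvK x, some x.1, some x.2) else s := by
  unfold pvStep pvK
  by_cases hp : pv_is_palindromic (x.1 * x.2)
  · simp [hp]
  · simp [hp]; omega

theorem pvMx_ge (L : List (Int × Int)) (r : Int) : r ≤ pvMx L r := by
  induction L generalizing r with
  | nil => simp [pvMx]
  | cons x L ih => exact le_trans (le_max_left _ _) (ih (max r (pvK x)))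

theorem pvMx_le_of_mem (L : List (Int × Int)) (r : Int) (x : Int × Int) (hx : x ∈ L) :
    pvK x ≤ pvMx L r := by
  induction L generalizing r with
  | nil => cases hx
  | cons y L ih =>
    rcases List.mem_cons.1 hx with h | h
    · subst h; exact le_trans (le_max_right _ _) (pvMx_ge L _)
    · exact ih _ h

theorem pvMx_attained (L : List (Int × Int)) (r : Int) (h : r < pvMx L r) :
    ∃ x ∈ L, pvK x = pvMx L r := by
  induction L generalizing r with
  | nil => simp [pvMx] at h
  | cons x L ih =>
    have hcons : pvMx (x :: L) r = pvMx L (max r (pvK x)) := rfl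
    by_cases h2 : max r (pvK x) < pvMx L (max r (pvK x))
    · obtain ⟨y, hy, hky⟩ := ih _ h2
      exact ⟨y, List.mem_cons_of_mem _ hy, by rw [hcons]; exact hky⟩
    · have : pvMx L (max r (pvK x)) = max r (pvK x) :=
        le_antisymm (not_lt.1 h2) (pvMx_ge _ _)
      rw [hcons, this] at h ⊢
      exact ⟨x, List.mem_cons_self, by omega⟩

-- A's fold computes the maximum key together with the FIRST pair attaining it
theorem pvFoldA (L : List (Int × Int)) (r : Int) (p0 : Option Int × Option Int) (h : 0 ≤ r) :
    L.foldl pvStep (r, p0) =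
      (pvMx L r, if r < pvMx L r then pvSel (L.find? (fun x => pvK x == pvMx L r)) p0 else p0) := by
  induction L generalizing r p0 with
  | nil => simp [pvMx]
  | cons x L ih =>
    have hcons : pvMx (x :: L) r = pvMx L (max r (pvK x)) := rfl
    rw [List.foldl_cons, pvStep_eq _ _ h]
    by_cases hx : r < pvK x
    · rw [if_pos hx]
      have hk0 : (0:Int) ≤ pvK x := le_trans h (le_of_lt hx)
      rw [ih (pvK x) _ hk0, hcons, max_eq_right (le_of_lt hx)]
      have hMk : pvK x ≤ pvMx L (pvK x) := pvMx_ge _ _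
      by_cases he : pvK x = pvMx L (pvK x)
      · rw [if_neg (by omega), if_pos (by omega),
          List.find?_cons_of_pos (by simpa using he), pvSel]
      · rw [if_pos (by omega), if_pos (by omega),
          List.find?_cons_of_neg (by simp; omega)]
        obtain ⟨y, hy, hky⟩ := pvMx_attained L (pvK x) (by omega)
        have hs : (List.find? (fun z => pvK z == pvMx L (pvK x)) L).isSome :=
          List.find?_isSome.2 ⟨y, hy, by simpa using hky⟩
        cases hf : List.find? (fun z => pvK z == pvMx L (pvK x)) L with
        | none => rw [hf] at hs; simp at hs
        | some z => rfl
    · rw [if_neg hx, ih r p0 h, hcons, max_eq_left (by omega)]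
      by_cases hM : r < pvMx L r
      · rw [if_pos hM, if_pos hM, List.find?_cons_of_neg (by simp; omega)]
      · rw [if_neg hM, if_neg hM]

-- findSome? as find?-then-bind
theorem pvFindSome?_eq_bind {α β : Type} (L : List α) (f : α → Option β) :
    L.findSome? f = (L.find? (fun a => (f a).isSome)).bind f := by
  induction L with
  | nil => rfl
  | cons a L ih =>
    rw [List.findSome?_cons, List.find?_cons]
    cases hf : f a with
    | some b => simp [hf]
    | none => simp [ih]

theorem pvFindSome?_congr {α β : Type} (L : List α) (f g : α → Option β)
    (h : ∀ a ∈ L, f a = g a) : L.findSome? f = L.findSome? g := by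
  induction L with
  | nil => rfl
  | cons a L ih =>
    rw [List.findSome?_cons, List.findSome?_cons, h a List.mem_cons_self,
      ih (fun a ha => h a (List.mem_cons_of_mem _ ha))]

theorem pvFindSome?_guard {α β : Type} (L : List α) (p : α → Bool) (g : α → β) :
    L.findSome? (fun a => if p a then some (g a) else none) = (L.find? p).map g := by
  induction L with
  | nil => rfl
  | cons a L ih =>
    rw [List.findSome?_cons, List.find?_cons]
    by_cases hp : p a <;> simp [hp, ih]

-- first hit on a strictly descending list is the largest satisfying element
theorem pvFind?_desc (L : List Int) (hL : L.Pairwise (· > ·)) (p : Int → Bool) (m : Int)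
    (hm : m ∈ L) (hpm : p m = true) (hub : ∀ q ∈ L, m < q → p q = false) :
    L.find? p = some m := by
  induction L with
  | nil => cases hm
  | cons a L ih =>
    rcases List.mem_cons.1 hm with h | h
    · subst h; rw [List.find?_cons_of_pos hpm]
    · have ham : a > m := (List.pairwise_cons.1 hL).1 m h
      rw [List.find?_cons_of_neg (by rw [hub a List.mem_cons_self ham]; simp)]
      exact ih (List.pairwise_cons.1 hL).2 h
        (fun q hq hmq => hub q (List.mem_cons_of_mem _ hq) hmq)

-- find? when the predicate holds at exactly one element
theorem pvFind?_unique {α : Type} (L : List α) (p : α → Bool) (m : α) (hm : m ∈ L)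
    (hpm : p m = true) (hu : ∀ q ∈ L, p q = true → q = m) : L.find? p = some m := by
  induction L with
  | nil => cases hm
  | cons a L ih =>
    by_cases hpa : p a
    · rw [List.find?_cons_of_pos hpa, hu a List.mem_cons_self hpa]
    · have ham : m ≠ a := fun h => hpa (h ▸ hpm)
      rw [List.find?_cons_of_neg (by simpa using hpa)]
      exact ih (List.mem_cons.1 hm |>.resolve_left ham)
        (fun q hq h => hu q (List.mem_cons_of_mem _ hq) h)

-- the lex-ordered list of pairs A scans, and A's overall maximum key
def pvPairs (n1 n2 : Int) : List (Int × Int) :=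
  (PySem.List.pyRange 0 (n1 + 1) 1).flatMap (fun i =>
    (PySem.List.pyRange 0 (n2 + 1) 1).map (fun j => (i, j)))

-- B's outer-loop body, named so the port can be rewritten against it (definitional)
def pvBf (n1 n2 : Int) : Int → Option (Int × Int) := fun p =>
  if pv_is_palindromic p then
    ((PySem.List.pyRange 1 (n1 + 1) 1).find? (fun i =>
        PySem.Int.mod p i == 0 && decide (PySem.Int.floordiv p i ≤ n2))).map (fun i => (p, i))
  else none

theorem pvB_eq (n1 n2 : Int) :
    find_palindromic_alt n1 n2 =
      match (PySem.List.pyRange (n1 * n2) 0 (-1)).findSome? (pvBf n1 n2) with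
      | some (p, i) => [("prod", p), ("n1", i), ("n2", PySem.Int.floordiv p i)]
      | none => [] := rfl

-- B's inner-loop predicate
def pvInner (n2 p i : Int) : Bool :=
  PySem.Int.mod p i == 0 && decide (PySem.Int.floordiv p i ≤ n2)

theorem pvMem_pairs (n1 n2 : Int) (x : Int × Int) :
    x ∈ pvPairs n1 n2 ↔ 0 ≤ x.1 ∧ x.1 ≤ n1 ∧ 0 ≤ x.2 ∧ x.2 ≤ n2 := by
  simp only [pvPairs, List.mem_flatMap, List.mem_map, PySem.List.mem_pyRange_one]
  constructor
  · rintro ⟨i, hi, j, hj, rfl⟩; exact ⟨hi.1, by omega, hj.1, by omega⟩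
  · rintro ⟨h1, h2, h3, h4⟩; exact ⟨x.1, ⟨h1, by omega⟩, x.2, ⟨h3, by omega⟩, rfl⟩

theorem pvReshape (n1 n2 : Int) :
    (PySem.List.pyRange 0 (n1 + 1) 1).foldl (fun s i =>
      (PySem.List.pyRange 0 (n2 + 1) 1).foldl (fun s j =>
        if pv_is_palindromic (i * j) && decide (i * j > s.1) then (i * j, some i, some j) else s) s)
      ((0 : Int), (none : Option Int), (none : Option Int)) =
    (pvPairs n1 n2).foldl pvStep (0, none, none) := by
  rw [pvPairs, List.foldl_flatMap]
  simp only [List.foldl_map]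
  rfl

theorem pvK_eq_iff (q : Int) (hq : 1 ≤ q) (x : Int × Int) :
    pvK x = q ↔ pv_is_palindromic (x.1 * x.2) = true ∧ x.1 * x.2 = q := by
  unfold pvK
  by_cases hp : pv_is_palindromic (x.1 * x.2)
  · simp [hp]
  · simp [hp]; omega

-- a successful divisor test for q yields a pair of A's scan with key q
theorem pvExistsPair (n1 n2 q i : Int) (hq : 1 ≤ q) (hpal : pv_is_palindromic q = true)
    (hi1 : 1 ≤ i) (hin : i ≤ n1) (hIP : pvInner n2 q i = true) :
    ∃ x ∈ pvPairs n1 n2, pvK x = q := by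
  have hi0 : (0:Int) < i := by omega
  unfold pvInner at hIP
  rw [Bool.and_eq_true] at hIP
  have hdvd : i ∣ q := by
    rw [← PySem.Int.mod_eq_zero_iff_dvd]; simpa using hIP.1
  have hj2 : PySem.Int.floordiv q i ≤ n2 := by simpa using hIP.2
  set j := PySem.Int.floordiv q i with hjdef
  have hje : j = q / i := by rw [hjdef, PySem.Int.floordiv_eq_ediv_of_pos hi0]
  have hij : i * j = q := by rw [hje]; exact Int.mul_ediv_cancel' hdvd
  have hj1 : 1 ≤ j := by nlinarith
  refine ⟨(i, j), (pvMem_pairs n1 n2 (i, j)).2 ⟨by omega, by omega, by omega, hj2⟩, ?_⟩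
  rw [pvK_eq_iff q hq]
  exact ⟨by simpa [hij] using hpal, hij⟩

-- conversely, a pair with key q ≥ 1 gives a divisor of q passed by B's test
theorem pvPairValue (n1 n2 q : Int) (x : Int × Int) (hx : x ∈ pvPairs n1 n2)
    (hk : pvK x = q) (hq : 1 ≤ q) :
    pv_is_palindromic q = true ∧ ∃ i, 1 ≤ i ∧ i ≤ n1 ∧ pvInner n2 q i = true := by
  obtain ⟨hpal, hij⟩ := (pvK_eq_iff q hq x).1 hk
  obtain ⟨hx1, hx2, hx3, hx4⟩ := (pvMem_pairs n1 n2 x).1 hx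
  have hi1 : 1 ≤ x.1 := by
    by_contra hc
    have hc' : x.1 ≤ 0 := by omega
    nlinarith
  have hi0 : x.1 ≠ 0 := by omega
  have hfd : PySem.Int.floordiv q x.1 = x.2 := by
    rw [PySem.Int.floordiv_eq_ediv_of_pos (by omega), ← hij, Int.mul_ediv_cancel_left _ hi0]
  refine ⟨by simpa [hij] using hpal, x.1, hi1, hx2, ?_⟩
  unfold pvInner
  rw [Bool.and_eq_true]
  constructor
  · simp [PySem.Int.mod_eq_zero_iff_dvd]; exact ⟨x.2, hij.symm⟩
  · simp [hfd, hx4]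

-- a single row of A's scan, rewritten as B's divisor test for the maximum M
theorem pvRow (n2 M i : Int) (hM : 1 ≤ M) (hpal : pv_is_palindromic M = true) (hi : 0 ≤ i) :
    (PySem.List.pyRange 0 (n2 + 1) 1).find? (fun j => pvK (i, j) == M) =
      if 1 ≤ i ∧ pvInner n2 M i = true then some (PySem.Int.floordiv M i) else none := by
  split
  case isTrue h =>
    obtain ⟨hi1, hIP⟩ := h
    have hi0 : (0:Int) < i := by omega
    unfold pvInner at hIP
    rw [Bool.and_eq_true] at hIP
    have hdvd : i ∣ M := by
      rw [← PySem.Int.mod_eq_zero_iff_dvd]; simpa using hIP.1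
    have hj2 : PySem.Int.floordiv M i ≤ n2 := by simpa using hIP.2
    set j := PySem.Int.floordiv M i with hjdef
    have hje : j = M / i := by rw [hjdef, PySem.Int.floordiv_eq_ediv_of_pos hi0]
    have hij : i * j = M := by rw [hje]; exact Int.mul_ediv_cancel' hdvd
    have hj1 : 1 ≤ j := by nlinarith
    apply pvFind?_unique
    · exact (PySem.List.mem_pyRange_one).2 ⟨by omega, by omega⟩
    · simp only [beq_iff_eq]; exact (pvK_eq_iff M hM (i, j)).2 ⟨by simpa [hij] using hpal, hij⟩
    · intro q hq hkq
      have := (pvK_eq_iff M hM (i, q)).1 (by simpa using hkq)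
      have h2 : i * q = M := this.2
      have : i * q = i * j := by omega
      exact mul_left_cancel₀ (by omega : i ≠ 0) this
  case isFalse h =>
    rw [List.find?_eq_none]
    intro j hj hkj
    have hj' := (PySem.List.mem_pyRange_one).1 hj
    have hk : pvK (i, j) = M := by simpa using hkj
    obtain ⟨hpal', hij⟩ := (pvK_eq_iff M hM (i, j)).1 hk
    have hi1 : 1 ≤ i := by
      by_contra hc
      have hc' : i ≤ 0 := by omega
      nlinarith
    have hfd : PySem.Int.floordiv M i = j := by
      rw [PySem.Int.floordiv_eq_ediv_of_pos (by omega), ← hij,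
        Int.mul_ediv_cancel_left _ (by omega : i ≠ 0)]
    apply h
    refine ⟨hi1, ?_⟩
    unfold pvInner
    rw [Bool.and_eq_true]
    exact ⟨by simp [PySem.Int.mod_eq_zero_iff_dvd]; exact ⟨j, hij.symm⟩, by simp [hfd]; omega⟩

-- ===== main proof =====

theorem pvMain (n1 n2 : Int) (h1 : 1 ≤ n1) (h2 : 1 ≤ n2) :
    find_palindromic n1 n2 = find_palindromic_alt n1 n2 := by
  set M := pvMx (pvPairs n1 n2) 0 with hMdef
  -- M is at least 1: the pair (1,1) has key 1
  have hmem11 : ((1:Int), (1:Int)) ∈ pvPairs n1 n2 :=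
    (pvMem_pairs n1 n2 (1, 1)).2 ⟨by omega, by omega, by omega, by omega⟩
  have hk11 : pvK (1, 1) = 1 := by decide
  have hM1 : 1 ≤ M := by
    have := pvMx_le_of_mem (pvPairs n1 n2) 0 (1, 1) hmem11
    omega
  -- M is attained at some pair, hence palindromic, ≤ n1*n2 and with a divisor in 1..n1
  obtain ⟨x, hx, hkx⟩ := pvMx_attained (pvPairs n1 n2) 0 (by omega)
  rw [← hMdef] at hkx
  obtain ⟨hpalM, i0, hi01, hi0n, hIP0⟩ := pvPairValue n1 n2 M x hx hkx hM1
  have hMle : M ≤ n1 * n2 := by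
    obtain ⟨_, hijx⟩ := (pvK_eq_iff M hM1 x).1 hkx
    obtain ⟨ha, hb, hc, hd⟩ := (pvMem_pairs n1 n2 x).1 hx
    nlinarith
  -- the first divisor of M that B's inner loop finds
  have hsome : ((PySem.List.pyRange 1 (n1 + 1) 1).find? (pvInner n2 M)).isSome :=
    List.find?_isSome.2 ⟨i0, (PySem.List.mem_pyRange_one).2 ⟨hi01, by omega⟩, hIP0⟩
  obtain ⟨istar, hfi⟩ := Option.isSome_iff_exists.1 hsome
  -- ===== B's value =====
  have hfM : pvBf n1 n2 M = some (M, istar) := by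
    unfold pvBf
    rw [if_pos hpalM]
    have hlam : (fun i => PySem.Int.mod M i == 0 && decide (PySem.Int.floordiv M i ≤ n2)) =
        pvInner n2 M := rfl
    rw [hlam, hfi, Option.map_some]
  have hpw : (PySem.List.pyRange (n1 * n2) 0 (-1)).Pairwise (· > ·) := by
    rw [PySem.List.pyRange_neg_one_eq_reverse]
    exact List.pairwise_reverse.2 ((PySem.List.pairwise_lt_pyRange_one _ _).imp (fun h => h))
  have hub : ∀ q ∈ PySem.List.pyRange (n1 * n2) 0 (-1), M < q → ((pvBf n1 n2 q).isSome) = false := by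
    intro q hq hMq
    have hq' := (PySem.List.mem_pyRange_neg_one).1 hq
    unfold pvBf
    by_cases hpq : pv_is_palindromic q
    · rw [if_pos hpq, Option.isSome_map]
      cases hfq : (PySem.List.pyRange 1 (n1 + 1) 1).find? (fun i =>
          PySem.Int.mod q i == 0 && decide (PySem.Int.floordiv q i ≤ n2)) with
      | none => rfl
      | some i =>
        exfalso
        have himem := (PySem.List.mem_pyRange_one).1 (List.mem_of_find?_eq_some hfq)
        have hIP : pvInner n2 q i = true := List.find?_some hfq
        obtain ⟨y, hy, hky⟩ :=
          pvExistsPair n1 n2 q i (by omega) hpq (by omega) (by omega) hIP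
        have := pvMx_le_of_mem (pvPairs n1 n2) 0 y hy
        omega
    · rw [if_neg hpq]; rfl
  have hDfind : (PySem.List.pyRange (n1 * n2) 0 (-1)).find? (fun p => (pvBf n1 n2 p).isSome) = some M :=
    pvFind?_desc _ hpw _ M ((PySem.List.mem_pyRange_neg_one).2 ⟨by omega, hMle⟩)
      (by rw [hfM]; rfl) hub
  have hB : find_palindromic_alt n1 n2 =
      [("prod", M), ("n1", istar), ("n2", PySem.Int.floordiv M istar)] := by
    rw [pvB_eq, pvFindSome?_eq_bind, hDfind, Option.bind_some, hfM]
  -- ===== A's value =====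
  have hrowmap : ∀ i ∈ PySem.List.pyRange 0 (n1 + 1) 1,
      ((PySem.List.pyRange 0 (n2 + 1) 1).find? (fun j => pvK (i, j) == M)).map (fun j => (i, j)) =
        (if 1 ≤ i ∧ pvInner n2 M i = true then some (i, PySem.Int.floordiv M i) else none) := by
    intro i hi
    have hi' := (PySem.List.mem_pyRange_one).1 hi
    rw [pvRow n2 M i hM1 hpalM hi'.1]
    split
    · rw [Option.map_some]
    · rw [Option.map_none]
  have hAfind : (pvPairs n1 n2).find? (fun x => pvK x == M) =
      some (istar, PySem.Int.floordiv M istar) := by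
    rw [pvPairs, List.find?_flatMap]
    have hrw : (PySem.List.pyRange 0 (n1 + 1) 1).findSome?
          (fun i => ((PySem.List.pyRange 0 (n2 + 1) 1).map (fun j => (i, j))).find?
            (fun x => pvK x == M)) =
        (PySem.List.pyRange 0 (n1 + 1) 1).findSome?
          (fun i => if 1 ≤ i ∧ pvInner n2 M i = true then some (i, PySem.Int.floordiv M i) else none) := by
      apply pvFindSome?_congr
      intro i hi
      rw [List.find?_map]
      exact hrowmap i hi
    rw [hrw, PySem.List.pyRange_one_cons (by omega : (0:Int) < n1 + 1), List.findSome?_cons]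
    have h0 : (if (1:Int) ≤ 0 ∧ pvInner n2 M 0 = true then some ((0:Int), PySem.Int.floordiv M 0) else none) = none := by
      rw [if_neg]; rintro ⟨h, -⟩; omega
    rw [h0]
    have hcongr2 : (PySem.List.pyRange (0 + 1) (n1 + 1) 1).findSome?
          (fun i => if 1 ≤ i ∧ pvInner n2 M i = true then some (i, PySem.Int.floordiv M i) else none) =
        (PySem.List.pyRange (0 + 1) (n1 + 1) 1).findSome?
          (fun i => if pvInner n2 M i then some (i, PySem.Int.floordiv M i) else none) := by
      apply pvFindSome?_congr
      intro i hi
      have hi' := (PySem.List.mem_pyRange_one).1 hi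
      by_cases hp : pvInner n2 M i = true
      · rw [if_pos ⟨by omega, hp⟩, if_pos hp]
      · rw [if_neg (by rintro ⟨-, h⟩; exact hp h), if_neg hp]
    rw [hcongr2, pvFindSome?_guard]
    have : PySem.List.pyRange (0 + 1) (n1 + 1) 1 = PySem.List.pyRange 1 (n1 + 1) 1 := by norm_num
    rw [this, hfi, Option.map_some]
  have hA : find_palindromic n1 n2 =
      [("prod", M), ("n1", istar), ("n2", PySem.Int.floordiv M istar)] := by
    show (match (PySem.List.pyRange 0 (n1 + 1) 1).foldl (fun s i =>
      (PySem.List.pyRange 0 (n2 + 1) 1).foldl (fun s j =>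
        if pv_is_palindromic (i * j) && decide (i * j > s.1) then (i * j, some i, some j) else s) s)
      ((0 : Int), (none : Option Int), (none : Option Int)) with
      | (r, some fn, some sn) => [("prod", r), ("n1", fn), ("n2", sn)]
      | (_, _, _) => []) = _
    rw [pvReshape, pvFoldA _ _ _ (le_refl 0), ← hMdef, if_pos (by omega), hAfind]
    rfl
  rw [hA, hB]

theorem find_palindromic_spec : Claim_equal_find_palindromic := by
  intro n1 n2 _ hpre
  unfold Spec_find_palindromic
  exact pvMain n1 n2 hpre.1 hpre.2
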